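-- pv_equiv track=rewrite | github.com/sbilikepy/BS_workspace | Lessons/Django_ORM/daily.py | pendulum
-- ===== SOURCE A (Python) =====
-- def pendulum(lst: list) -> list:
--     left, right = [], []
--     min_el = min(lst)
--     for i in sorted(lst):
--         if i > min_el:
--             right.append(i)
--         if i < min_el:
--             left.append(i)
--         if i == min_el:
--             pass
--     return left + [min_el] + right
-- ===== SOURCE B (Python) =====
-- def pendulum(lst: list) -> list:
--     min_el = min(lst)
--     s = sorted(lst)
--     i = 0
--     while i < len(s) and s[i] == min_el:
--         i += 1
--     return [min_el] + s[i:]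
-- ===== Notes on version B (the rewrite author's own statement) =====
-- stated objective: simpler
-- what changed: A folds over the sorted list maintaining two accumulator lists (one of which is provably always empty); B just skips the leading run of minima in the sorted list and prepends one minimum.
import Mathlib
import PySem

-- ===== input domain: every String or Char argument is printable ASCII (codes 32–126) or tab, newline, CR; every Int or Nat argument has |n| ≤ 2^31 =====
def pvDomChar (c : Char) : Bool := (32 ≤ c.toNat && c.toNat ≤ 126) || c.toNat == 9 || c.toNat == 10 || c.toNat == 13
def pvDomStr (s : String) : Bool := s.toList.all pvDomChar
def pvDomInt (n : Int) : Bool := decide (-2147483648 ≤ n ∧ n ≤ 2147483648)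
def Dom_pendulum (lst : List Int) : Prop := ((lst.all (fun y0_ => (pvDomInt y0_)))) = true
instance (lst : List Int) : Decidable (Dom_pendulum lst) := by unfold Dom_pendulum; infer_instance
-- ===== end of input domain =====

-- B replaces A's two-accumulator fold over the sorted list by skipping the leading run of minima; objective: simpler.

-- ===== PORT A =====
def pendulum (lst : List Int) : List Int :=
  match PySem.List.min? lst (fun x => x) with
  | none => []          -- min([]) raises ValueError; excluded by Pre_pendulum
  | some min_el =>
    let p := (PySem.List.sorted lst (fun x => x) false).foldl
      (fun (st : List Int × List Int) i =>
        let st := if i > min_el then (st.1, st.2 ++ [i]) else st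
        let st := if i < min_el then (st.1 ++ [i], st.2) else st
        st) ([], [])
    p.1 ++ [min_el] ++ p.2

-- ===== PORT B =====
-- the while-loop that advances i past the leading run of the minimum, as structural recursion
def pendulumSkip (m : Int) : List Int → List Int
  | [] => []
  | x :: t => if x == m then pendulumSkip m t else x :: t

def pendulum_alt (lst : List Int) : List Int :=
  match PySem.List.min? lst (fun x => x) with
  | none => []          -- min([]) raises ValueError; excluded by Pre_pendulum
  | some min_el =>
    min_el :: pendulumSkip min_el (PySem.List.sorted lst (fun x => x) false)

-- ===== PRECONDITION & SPEC =====
-- min(lst) raises ValueError on the empty list (in both A and B), so it is excluded.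
def Pre_pendulum (lst : List Int) : Prop := lst ≠ []
instance (lst : List Int) : Decidable (Pre_pendulum lst) := by unfold Pre_pendulum; infer_instance
def pvWitness_pendulum : List Int := [3, 1, 1, 2]

def Spec_pendulum (lst : List Int) (out : List Int) : Prop := out = pendulum_alt lst
instance (lst : List Int) (out : List Int) : Decidable (Spec_pendulum lst out) := by unfold Spec_pendulum; infer_instance

-- ===== CLAIM (what is proved, stated in full; the proofs are below) =====
def Claim_equal_pendulum : Prop := ∀ (lst : List Int), Dom_pendulum lst → Pre_pendulum lst → Spec_pendulum lst (pendulum lst)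

-- ===== LEMMAS AND PROOFS =====

theorem pendulum_fold_eq (m : Int) (s : List Int) (hmin : ∀ x ∈ s, m ≤ x) :
    ∀ l r : List Int,
      s.foldl (fun (st : List Int × List Int) i =>
        let st := if i > m then (st.1, st.2 ++ [i]) else st
        let st := if i < m then (st.1 ++ [i], st.2) else st
        st) (l, r)
      = (l, r ++ s.filter (fun x => decide (m < x))) := by
  induction s with
  | nil => intro l r; simp
  | cons x t ih =>
    intro l r
    have hmx : m ≤ x := hmin x (by simp)
    have ht : ∀ y ∈ t, m ≤ y := fun y hy => hmin y (by simp [hy])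
    by_cases h : m < x
    · simp only [List.foldl_cons, List.filter_cons]
      rw [if_pos h, if_neg (by omega)]
      simp only [decide_eq_true h]
      rw [ih ht l (r ++ [x])]
      simp
    · have hxm : x = m := le_antisymm (by omega) hmx
      simp only [List.foldl_cons, List.filter_cons]
      rw [if_neg (by omega), if_neg (by omega)]
      simp only [decide_eq_false (by omega : ¬ m < x)]
      exact ih ht l r

theorem pendulum_skip_eq (m : Int) (s : List Int) (hpw : s.Pairwise (· ≤ ·))
    (hmin : ∀ x ∈ s, m ≤ x) :
    pendulumSkip m s = s.filter (fun x => decide (m < x)) := by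
  induction s with
  | nil => rfl
  | cons x t ih =>
    have hmx : m ≤ x := hmin x (by simp)
    have ht : ∀ y ∈ t, m ≤ y := fun y hy => hmin y (by simp [hy])
    have hx : ∀ y ∈ t, x ≤ y := (List.pairwise_cons.mp hpw).1
    have hpt : t.Pairwise (· ≤ ·) := (List.pairwise_cons.mp hpw).2
    by_cases h : x = m
    · subst h
      simp only [pendulumSkip, beq_self_eq_true, if_true, List.filter_cons]
      rw [decide_eq_false (by omega : ¬ x < x)]
      simpa using ih hpt ht
    · have hlt : m < x := lt_of_le_of_ne hmx (fun e => h e.symm)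
      simp only [pendulumSkip, List.filter_cons]
      rw [if_neg (by simpa using h), decide_eq_true hlt]
      simp only [if_true]
      have : t.filter (fun y => decide (m < y)) = t :=
        List.filter_eq_self.mpr (fun y hy => decide_eq_true (lt_of_lt_of_le hlt (hx y hy)))
      rw [this]

-- ===== VERDICT (by name: the statement is the Claim_ definition above) =====
theorem pendulum_spec : Claim_equal_pendulum := by
  intro lst _ hpre
  unfold Spec_pendulum pendulum pendulum_alt
  cases hmin : PySem.List.min? lst (fun x => x) with
  | none => rfl
  | some m =>
    have hisMin : ∀ y ∈ lst, m ≤ y := by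
      have := PySem.List.min?_isMin (xs := lst) (key := fun x => x) hmin
      simpa using this
    set s := PySem.List.sorted lst (fun x => x) false with hs
    have hmins : ∀ x ∈ s, m ≤ x := by
      intro x hx
      exact hisMin x ((PySem.List.mem_sorted _ _ _ _).mp hx)
    have hpw : s.Pairwise (· ≤ ·) := by
      have := PySem.List.sorted_pairwise (xs := lst) (key := fun x => x)
      simpa using this
    simp only
    rw [pendulum_fold_eq m s hmins [] [], pendulum_skip_eq m s hpw hmins]
    simp
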